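-- pv_equiv track=rewrite | github.com/mk-samoilov/Pain-Walking-Trainer | src/ai/__init__.py | _compute_mask_slices
-- ===== SOURCE A (Python) =====
-- def _compute_mask_slices(layer_sizes: list[int]) -> list[tuple[int, int]]:
--     """Return (start, end) genome index ranges that correspond to mask entries."""
--
--     slices = []
--     idx = 0
--     for i in range(len(layer_sizes) - 1):
--         n_w = layer_sizes[i + 1] * layer_sizes[i]
--         n_b = layer_sizes[i + 1]
--         slices.append((idx + n_w, idx + 2 * n_w))
--         idx += 2 * n_w + n_b
--     return slices
-- ===== SOURCE B (Python) =====
-- def _compute_mask_slices(layer_sizes: list[int]) -> list[tuple[int, int]]: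
--     """Return (start, end) genome index ranges that correspond to mask entries."""
--     pairs = list(zip(layer_sizes, layer_sizes[1:]))
--     end = sum(2 * a * b + b for a, b in pairs)
--     out = []
--     for a, b in reversed(pairs):
--         n_w = b * a
--         end -= 2 * n_w + b
--         out.append((end + n_w, end + 2 * n_w))
--     out.reverse()
--     return out
-- ===== Notes on version B (the rewrite author's own statement) =====
-- stated objective: alternative
-- what changed: Builds the slices back-to-front: it first computes the total genome length as the sum of all block costs, then walks the consecutive-pair list in reverse, subtracting each block's cost to recover its start offset and emitting slices last-to-first, reversing once at the end, instead of A's forward loop with a growing index accumulator.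
import Mathlib
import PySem

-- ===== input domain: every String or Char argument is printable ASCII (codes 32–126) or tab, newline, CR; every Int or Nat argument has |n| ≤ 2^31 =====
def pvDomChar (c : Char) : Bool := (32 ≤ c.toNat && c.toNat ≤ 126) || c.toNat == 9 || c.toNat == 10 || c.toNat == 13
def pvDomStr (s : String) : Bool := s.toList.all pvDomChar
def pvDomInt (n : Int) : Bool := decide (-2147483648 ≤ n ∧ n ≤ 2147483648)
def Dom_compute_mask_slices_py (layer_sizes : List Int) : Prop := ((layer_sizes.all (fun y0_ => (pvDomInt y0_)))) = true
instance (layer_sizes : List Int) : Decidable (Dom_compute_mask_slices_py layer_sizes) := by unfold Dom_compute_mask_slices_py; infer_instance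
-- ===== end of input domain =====

-- B builds the slice list back-to-front: total genome length first, then a reverse walk over the consecutive pairs subtracting block costs; same O(n) cost, different algorithmic decomposition.


-- ===== PORT A =====
-- for i in range(len(layer_sizes)-1): both indexed reads are always in range, so pyGetD is exact here
def compute_mask_slices_py (layer_sizes : List Int) : List (Int × Int) :=
  ((PySem.List.pyRange 0 ((layer_sizes.length : Int) - 1) 1).foldl
    (fun (st : List (Int × Int) × Int) i =>
      let n_w := PySem.List.pyGetD layer_sizes (i + 1) 0 * PySem.List.pyGetD layer_sizes i 0
      let n_b := PySem.List.pyGetD layer_sizes (i + 1) 0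
      (st.1 ++ [(st.2 + n_w, st.2 + 2 * n_w)], st.2 + 2 * n_w + n_b))
    ([], 0)).1

-- ===== PORT B =====
def compute_mask_slices_py_alt (layer_sizes : List Int) : List (Int × Int) :=
  let pairs := layer_sizes.zip layer_sizes.tail
  let total := pairs.foldl (fun s p => s + (2 * p.1 * p.2 + p.2)) 0
  let out := (pairs.reverse.foldl
    (fun (st : List (Int × Int) × Int) p =>
      let n_w := p.2 * p.1
      let e := st.2 - (2 * n_w + p.2)
      (st.1 ++ [(e + n_w, e + 2 * n_w)], e))
    ([], total)).1
  out.reverse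

-- ===== PRECONDITION & SPEC =====
def Spec_compute_mask_slices_py (layer_sizes : List Int) (out : List (Int × Int)) : Prop := out = compute_mask_slices_py_alt layer_sizes
instance (layer_sizes : List Int) (out : List (Int × Int)) : Decidable (Spec_compute_mask_slices_py layer_sizes out) := by unfold Spec_compute_mask_slices_py; infer_instance

-- ===== CLAIM (what is proved, stated in full; the proofs are below) =====
def Claim_equal_compute_mask_slices_py : Prop := ∀ (layer_sizes : List Int), Dom_compute_mask_slices_py layer_sizes → Spec_compute_mask_slices_py layer_sizes (compute_mask_slices_py layer_sizes)

-- ===== LEMMAS AND PROOFS =====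

-- the common mathematical value: one slice per consecutive pair, with a running start index
def specSlices : List Int → Int → List (Int × Int)
  | a :: b :: t, idx => (idx + b * a, idx + 2 * (b * a)) :: specSlices (b :: t) (idx + (2 * (b * a) + b))
  | _, _ => []

-- total block cost of a layer list
def costSum : List Int → Int
  | a :: b :: t => (2 * a * b + b) + costSum (b :: t)
  | _ => 0

theorem pyGetD_cons_natCast (a : Int) (xs : List Int) (k : Nat) (d : Int) :
    PySem.List.pyGetD (a :: xs) ((k : Int) + 1) d = PySem.List.pyGetD xs (k : Int) d := by
  have h : ((k : Int) + 1) = ((k + 1 : Nat) : Int) := by push_cast; ring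
  rw [h, PySem.List.pyGetD_natCast, PySem.List.pyGetD_natCast]
  rfl

theorem pyGetD_cons_succ (a : Int) (xs : List Int) (i : Int) (hi : 0 ≤ i) (d : Int) :
    PySem.List.pyGetD (a :: xs) (i + 1) d = PySem.List.pyGetD xs i d := by
  obtain ⟨k, rfl⟩ := Int.eq_ofNat_of_zero_le hi
  exact pyGetD_cons_natCast a xs k d

theorem A_loop (xs : List Int) : ∀ (c : Int) (acc : List (Int × Int)) (idx : Int),
    ((List.range xs.length).foldl
      (fun (st : List (Int × Int) × Int) (k : Nat) =>
        let n_w := PySem.List.pyGetD (c :: xs) ((k : Int) + 1) 0 * PySem.List.pyGetD (c :: xs) (k : Int) 0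
        let n_b := PySem.List.pyGetD (c :: xs) ((k : Int) + 1) 0
        (st.1 ++ [(st.2 + n_w, st.2 + 2 * n_w)], st.2 + 2 * n_w + n_b))
      (acc, idx)).1 = acc ++ specSlices (c :: xs) idx := by
  induction xs with
  | nil => intro c acc idx; simp [specSlices]
  | cons b t ih =>
    intro c acc idx
    simp only [List.length_cons]
    rw [List.range_succ_eq_map, List.foldl_cons, List.foldl_map]
    have e1 : PySem.List.pyGetD (c :: b :: t) (((0 : Nat) : Int) + 1) 0 = b := by
      rw [pyGetD_cons_natCast]; simp
    have e0 : PySem.List.pyGetD (c :: b :: t) ((0 : Nat) : Int) 0 = c := by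
      simp
    simp only [e1, e0, Nat.succ_eq_add_one]
    have hstep :
        (fun (st : List (Int × Int) × Int) (k : Nat) =>
          let n_w := PySem.List.pyGetD (c :: b :: t) ((↑(k + 1) : Int) + 1) 0 *
                     PySem.List.pyGetD (c :: b :: t) (↑(k + 1) : Int) 0
          let n_b := PySem.List.pyGetD (c :: b :: t) ((↑(k + 1) : Int) + 1) 0
          (st.1 ++ [(st.2 + n_w, st.2 + 2 * n_w)], st.2 + 2 * n_w + n_b)) =
        (fun (st : List (Int × Int) × Int) (k : Nat) =>
          let n_w := PySem.List.pyGetD (b :: t) ((k : Int) + 1) 0 * PySem.List.pyGetD (b :: t) (k : Int) 0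
          let n_b := PySem.List.pyGetD (b :: t) ((k : Int) + 1) 0
          (st.1 ++ [(st.2 + n_w, st.2 + 2 * n_w)], st.2 + 2 * n_w + n_b)) := by
      funext st k
      have h3 : ((↑(k + 1) : Int)) = (k : Int) + 1 := by push_cast; ring
      rw [h3]
      rw [pyGetD_cons_succ c (b :: t) ((k : Int) + 1) (by positivity) 0]
      rw [pyGetD_cons_succ c (b :: t) (k : Int) (Int.natCast_nonneg k) 0]
    rw [hstep, ih b (acc ++ [(idx + b * c, idx + 2 * (b * c))]) (idx + 2 * (b * c) + b)]
    have hidx : idx + 2 * (b * c) + b = idx + (2 * (b * c) + b) := by ring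
    rw [hidx]
    simp [specSlices]

-- the foldl-sum in B equals costSum
theorem foldl_cost (xs : List Int) : ∀ (s : Int),
    (xs.zip xs.tail).foldl (fun s p => s + (2 * p.1 * p.2 + p.2)) s = s + costSum xs := by
  induction xs with
  | nil => intro s; simp [costSum]
  | cons a ys ih =>
    intro s
    cases ys with
    | nil => simp [costSum]
    | cons b t =>
      simp only [List.tail_cons, List.zip_cons_cons, List.foldl_cons, costSum]
      have := ih (s := s + (2 * a * b + b))
      simp only [List.tail_cons] at this
      rw [this]; ring

-- B's reverse walk from t0 + costSum xs produces the slices in reverse order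
theorem B_back (xs : List Int) : ∀ (acc : List (Int × Int)) (t0 : Int),
    ((xs.zip xs.tail).reverse.foldl
      (fun (st : List (Int × Int) × Int) p =>
        let n_w := p.2 * p.1
        let e := st.2 - (2 * n_w + p.2)
        (st.1 ++ [(e + n_w, e + 2 * n_w)], e))
      (acc, t0 + costSum xs)) = (acc ++ (specSlices xs t0).reverse, t0) := by
  induction xs with
  | nil => intro acc t0; simp [specSlices, costSum]
  | cons a ys ih =>
    intro acc t0
    cases ys with
    | nil => simp [specSlices, costSum]
    | cons b t =>
      simp only [List.tail_cons, List.zip_cons_cons, List.reverse_cons, List.foldl_append,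
        List.foldl_cons, List.foldl_nil]
      have h0 : t0 + costSum (a :: b :: t) = (t0 + (2 * a * b + b)) + costSum (b :: t) := by
        simp [costSum]; ring
      rw [h0]
      have := ih (acc := acc) (t0 := t0 + (2 * a * b + b))
      simp only [List.tail_cons] at this
      rw [this]
      simp only [specSlices, List.reverse_cons, List.append_assoc]
      rw [show t0 + (2 * a * b + b) = t0 + (2 * (b * a) + b) from by ring,
          show t0 + (2 * (b * a) + b) - (2 * (b * a) + b) = t0 from by ring]

-- ===== VERDICT (by name: the statement is the Claim_ definition above) =====
theorem compute_mask_slices_py_spec : Claim_equal_compute_mask_slices_py := by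
  intro xs _
  unfold Spec_compute_mask_slices_py
  show compute_mask_slices_py xs = compute_mask_slices_py_alt xs
  have hB : compute_mask_slices_py_alt xs = specSlices xs 0 := by
    unfold compute_mask_slices_py_alt
    simp only []
    rw [foldl_cost]
    have := B_back xs (acc := []) (t0 := 0)
    rw [show (0 : Int) + costSum xs = costSum xs from by ring] at this
    rw [show ((0 : Int) + costSum xs) = costSum xs from by ring] at *
    rw [this]
    simp
  rw [hB]
  unfold compute_mask_slices_py
  cases xs with
  | nil =>
    rw [PySem.List.pyRange_one_eq_nil (by norm_num)]
    simp [specSlices]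
  | cons c t =>
    rw [show (((c :: t).length : Int) - 1) = ((t.length : Nat) : Int) from by simp,
        PySem.List.pyRange_zero_nat, List.foldl_map]
    simpa using A_loop t c [] 0
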